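-- pv_equiv track=rewrite | github.com/whq611/leetcode | 1712.ways to split array into three subarrays.py | waysToSplit
-- ===== SOURCE A (Python) =====
-- from typing import List
--
-- def waysToSplit(nums: List[int]) -> int:
--     n = len(nums)
--     summ = [0] * (n+1)
--     for i in range(1,n+1):
--         summ[i] = summ[i-1] + nums[i-1]
--     MOD = 1000000007
--     ans = 0
--     l,r = 2,2
--     for i in range(1,n-1):
--         l = max(l,i+1)
--         r = max(r,i+1)
--         while r<n and summ[n]-summ[r]>=summ[r]-summ[i]:
--             r+=1
--         while l<n and summ[l] - summ[i] < summ[i]: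
--             l+=1
--         if r>=l:
--             ans += r-l
--     return ans%MOD
-- ===== SOURCE B (Python) =====
-- from typing import List
--
-- def _first_ge(a: List[int], lo: int, hi: int, t: int) -> int:
--     # least j in [lo, hi] with j == hi or a[j] >= t  (a nondecreasing on the window)
--     while lo < hi:
--         mid = (lo + hi) // 2
--         if a[mid] >= t:
--             hi = mid
--         else:
--             lo = mid + 1
--     return lo
--
-- def _first_gt(a: List[int], lo: int, hi: int, t: int) -> int:
--     # least j in [lo, hi] with j == hi or a[j] > t  (a nondecreasing on the window)
--     while lo < hi:
--         mid = (lo + hi) // 2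
--         if a[mid] > t:
--             hi = mid
--         else:
--             lo = mid + 1
--     return lo
--
-- def waysToSplit(nums: List[int]) -> int:
--     n = len(nums)
--     summ = [0]
--     for x in nums:
--         summ.append(summ[-1] + x)
--     MOD = 1000000007
--     total = summ[n]
--     ans = 0
--     for i in range(1, n - 1):
--         lo = _first_ge(summ, i + 1, n, 2 * summ[i])
--         hi = _first_gt(summ, i + 1, n, (total + summ[i]) // 2)
--         if hi > lo:
--             ans += hi - lo
--     return ans % MOD
-- ===== Notes on version B (the rewrite author's own statement) =====
-- stated objective: alternative
-- what changed: Replaces A's stateful forward-only monotonic two-pointer sweep (l and r carried across first cuts) with, for each first cut i, two independent hand-written binary searches over the prefix-sum array (first index with summ[j] >= 2*summ[i], first index with 2*summ[j] > summ[n]+summ[i]); Pre_ restricts to the problem's stated domain of non-negative entries (plus trivial short lists), where prefix sums are monotone.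
-- outside the precondition, e.g. on waysToSplit([2, -1, 2, -1, 2, 2]): A returns 2, B returns 4
import Mathlib
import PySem

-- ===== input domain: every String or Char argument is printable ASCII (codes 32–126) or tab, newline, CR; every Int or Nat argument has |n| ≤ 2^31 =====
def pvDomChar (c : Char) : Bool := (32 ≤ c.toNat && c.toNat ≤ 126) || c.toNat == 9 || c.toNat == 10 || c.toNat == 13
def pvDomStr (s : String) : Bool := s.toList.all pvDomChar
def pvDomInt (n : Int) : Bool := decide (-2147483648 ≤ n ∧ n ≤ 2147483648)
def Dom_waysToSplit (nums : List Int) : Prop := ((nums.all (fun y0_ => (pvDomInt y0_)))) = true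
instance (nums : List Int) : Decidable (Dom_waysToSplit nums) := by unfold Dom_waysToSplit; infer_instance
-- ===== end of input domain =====

-- B replaces A's stateful forward-only two-pointer sweep by two independent binary
-- searches over the prefix-sum array for each first cut (objective: alternative).

-- ===== PORT A =====

-- while r<n and summ[n]-summ[r]>=summ[r]-summ[i]: r+=1   (fuel = n-r bounds the trip count)
def advR (summ : List Int) (n i : Nat) : Nat → Nat → Nat
  | 0, r => r
  | fuel + 1, r =>
    if r < n ∧ summ.getD n 0 - summ.getD r 0 ≥ summ.getD r 0 - summ.getD i 0 then
      advR summ n i fuel (r + 1)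
    else r

-- while l<n and summ[l]-summ[i]<summ[i]: l+=1   (fuel = n-l bounds the trip count)
def advL (summ : List Int) (n i : Nat) : Nat → Nat → Nat
  | 0, l => l
  | fuel + 1, l =>
    if l < n ∧ summ.getD l 0 - summ.getD i 0 < summ.getD i 0 then
      advL summ n i fuel (l + 1)
    else l

def waysToSplit (nums : List Int) : Int :=
  let n := nums.length
  let summ := (List.range' 1 n).foldl
    (fun s i => s.set i (s.getD (i - 1) 0 + nums.getD (i - 1) 0))
    (List.replicate (n + 1) (0 : Int))
  let fin := (List.range' 1 (n - 2)).foldl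
    (fun (st : Nat × Nat × Int) i =>
      let l0 := max st.1 (i + 1)
      let r0 := max st.2.1 (i + 1)
      let r := advR summ n i (n - r0) r0
      let l := advL summ n i (n - l0) l0
      (l, r, if r ≥ l then st.2.2 + ((r : Int) - (l : Int)) else st.2.2))
    (2, 2, 0)
  PySem.Int.mod fin.2.2 1000000007

-- ===== PORT B =====

-- least j in [lo, hi] with j = hi or a[j] ≥ t   (fuel ≥ hi-lo bounds the loop)
def firstGe (a : List Int) (t : Int) : Nat → Nat → Nat → Nat
  | 0, lo, _ => lo
  | fuel + 1, lo, hi =>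
    if lo < hi then
      let mid := (lo + hi) / 2
      if a.getD mid 0 ≥ t then firstGe a t fuel lo mid else firstGe a t fuel (mid + 1) hi
    else lo

-- least j in [lo, hi] with j = hi or a[j] > t   (fuel ≥ hi-lo bounds the loop)
def firstGt (a : List Int) (t : Int) : Nat → Nat → Nat → Nat
  | 0, lo, _ => lo
  | fuel + 1, lo, hi =>
    if lo < hi then
      let mid := (lo + hi) / 2
      if a.getD mid 0 > t then firstGt a t fuel lo mid else firstGt a t fuel (mid + 1) hi
    else lo

def waysToSplit_alt (nums : List Int) : Int :=
  let n := nums.length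
  -- summ = [0]; for x in nums: summ.append(summ[-1] + x)
  let summ := nums.foldl (fun s x => s ++ [(PySem.List.pyGet? s (-1)).getD 0 + x]) [(0 : Int)]
  let total := summ.getD n 0
  let ans := (List.range' 1 (n - 2)).foldl
    (fun (ans : Int) i =>
      let lo := firstGe summ (2 * summ.getD i 0) (n - (i + 1)) (i + 1) n
      let hi := firstGt summ (PySem.Int.floordiv (total + summ.getD i 0) 2) (n - (i + 1)) (i + 1) n
      if hi > lo then ans + ((hi : Int) - (lo : Int)) else ans)
    0
  PySem.Int.mod ans 1000000007

-- ===== PRECONDITION & SPEC =====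
-- Pre_ restricts to the problem's natural domain (LeetCode 1712 guarantees 0 ≤ nums[i];
-- lists shorter than 3, where no split exists and both loops are empty, are also covered):
-- on a longer list with a negative entry the prefix sums are not monotone, A's forward-only
-- two-pointer state no longer tracks anything meaningful, and B does not match it.
def Pre_waysToSplit (nums : List Int) : Prop := nums.length < 3 ∨ ∀ x ∈ nums, 0 ≤ x
instance (nums : List Int) : Decidable (Pre_waysToSplit nums) := by
  unfold Pre_waysToSplit; infer_instance

def pvWitness_waysToSplit : List Int := [1, 2, 2, 2, 5, 0]

def Spec_waysToSplit (nums : List Int) (out : Int) : Prop := out = waysToSplit_alt nums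
instance (nums : List Int) (out : Int) : Decidable (Spec_waysToSplit nums out) := by
  unfold Spec_waysToSplit; infer_instance

-- ===== CLAIM (what is proved, stated in full; the proofs are below) =====
def Claim_equal_waysToSplit : Prop := ∀ (nums : List Int), Dom_waysToSplit nums →
  Pre_waysToSplit nums → Spec_waysToSplit nums (waysToSplit nums)

-- ===== LEMMAS AND PROOFS =====

-- prefix sum of the first k elements
def pfSum (nums : List Int) (k : Nat) : Int := ((nums.take k).sum)

-- "R is where a guarded forward scan from s with continue-condition C stops (n = hard bound)"
def StopSpec (n : Nat) (C : Nat → Prop) (s R : Nat) : Prop :=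
  s ≤ R ∧ R ≤ n ∧ (∀ j, s ≤ j → j < R → C j) ∧ (R < n → ¬ C R)

theorem stopSpec_unique {n : Nat} {C : Nat → Prop} {s R1 R2 : Nat}
    (h1 : StopSpec n C s R1) (h2 : StopSpec n C s R2) : R1 = R2 := by
  obtain ⟨a1, b1, c1, d1⟩ := h1
  obtain ⟨a2, b2, c2, d2⟩ := h2
  by_contra hne
  rcases Nat.lt_or_ge R1 R2 with h | h
  · exact (d1 (lt_of_lt_of_le h b2)) (c2 R1 a1 h)
  · rcases Nat.lt_or_ge R2 R1 with h' | h'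
    · exact (d2 (lt_of_lt_of_le h' b1)) (c1 R2 a2 h')
    · exact hne (le_antisymm h' h)

-- weakening the start of a stop spec
theorem stopSpec_start {n : Nat} {C : Nat → Prop} {s s' R : Nat}
    (h : StopSpec n C s' R) (hs : s ≤ s') (hc : ∀ j, s ≤ j → j < s' → C j) :
    StopSpec n C s R := by
  obtain ⟨a, b, c, d⟩ := h
  exact ⟨le_trans hs a, b, fun j hj hjR => by
    rcases Nat.lt_or_ge j s' with h' | h'
    · exact hc j hj h'
    · exact c j h' hjR, d⟩

theorem pfSum_succ (nums : List Int) {k : Nat} (hk : k < nums.length) :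
    pfSum nums (k + 1) = pfSum nums k + nums.getD k 0 := by
  unfold pfSum
  rw [List.sum_take_succ _ _ hk, List.getD_eq_getElem _ _ hk]

theorem pfSum_mono (nums : List Int) (hPre : ∀ x ∈ nums, 0 ≤ x) :
    ∀ {j k : Nat}, j ≤ k → pfSum nums j ≤ pfSum nums k := by
  have step : ∀ k : Nat, pfSum nums k ≤ pfSum nums (k + 1) := by
    intro k
    unfold pfSum
    rw [List.take_add_one, List.sum_append]
    have : 0 ≤ (nums[k]?.toList).sum := by
      cases h : nums[k]? with
      | none => simp
      | some x => simpa using hPre x (List.mem_of_getElem? h)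
    omega
  intro j k h
  induction h with
  | refl => exact le_rfl
  | step h ih => exact le_trans ih (step _)

-- ===== A's prefix-sum build =====
def buildA (nums : List Int) : List Int :=
  (List.range' 1 nums.length).foldl
    (fun s i => s.set i (s.getD (i - 1) 0 + nums.getD (i - 1) 0))
    (List.replicate (nums.length + 1) (0 : Int))

theorem buildA_inv (nums : List Int) :
    ∀ k ≤ nums.length,
      ((List.range' 1 k).foldl
        (fun s i => s.set i (s.getD (i - 1) 0 + nums.getD (i - 1) 0))
        (List.replicate (nums.length + 1) (0 : Int))).length = nums.length + 1
      ∧ ∀ j ≤ nums.length,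
        ((List.range' 1 k).foldl
          (fun s i => s.set i (s.getD (i - 1) 0 + nums.getD (i - 1) 0))
          (List.replicate (nums.length + 1) (0 : Int))).getD j 0
          = if j ≤ k then pfSum nums j else 0 := by
  intro k
  induction k with
  | zero =>
    intro hk
    refine ⟨by simp, fun j hj => ?_⟩
    simp only [List.range'_zero, List.foldl_nil]
    rcases Nat.eq_zero_or_pos j with h | h
    · subst h; simp [pfSum]
    · simp only [List.getD, List.getElem?_replicate]
      rw [if_pos (by omega : j < nums.length + 1)]
      rw [if_neg (by omega : ¬ j ≤ 0)]
      rfl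
  | succ k ih =>
    intro hk
    have ihh := ih (by omega)
    rw [List.range'_concat, List.foldl_append, List.foldl_cons, List.foldl_nil]
    set prev := (List.range' 1 k).foldl
        (fun s i => s.set i (s.getD (i - 1) 0 + nums.getD (i - 1) 0))
        (List.replicate (nums.length + 1) (0 : Int)) with hprev
    have hlen : prev.length = nums.length + 1 := ihh.1
    refine ⟨by simp [hlen], fun j hj => ?_⟩
    have hidx : 1 + 1 * k = k + 1 := by omega
    rw [hidx]
    by_cases hje : j = k + 1
    · subst hje
      rw [List.getD_eq_getElem _ _ (by simp [hlen]; omega)]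
      rw [List.getElem_set_self]
      simp only [Nat.add_sub_cancel]
      rw [ihh.2 k (by omega)]
      rw [if_pos (by omega : k ≤ k), if_pos le_rfl]
      rw [pfSum_succ nums (by omega)]
    · have hne : (k + 1) ≠ j := fun h => hje h.symm
      rw [List.getD_eq_getElem?_getD, List.getElem?_set_ne hne, ← List.getD_eq_getElem?_getD]
      rw [ihh.2 j hj]
      by_cases hjk : j ≤ k
      · rw [if_pos hjk, if_pos (by omega)]
      · rw [if_neg hjk, if_neg (by omega)]

theorem buildA_good (nums : List Int) :
    ∀ j ≤ nums.length, (buildA nums).getD j 0 = pfSum nums j := by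
  intro j hj
  unfold buildA
  rw [(buildA_inv nums nums.length le_rfl).2 j hj, if_pos hj]

-- ===== B's prefix-sum build =====
def pfxL (l : List Int) : List Int :=
  (List.range (l.length + 1)).map (fun k => ((l.take k).sum))

theorem pfxL_nil : pfxL [] = [(0 : Int)] := rfl

theorem pfxL_concat (pre : List Int) (x : Int) :
    pfxL (pre ++ [x]) = pfxL pre ++ [pre.sum + x] := by
  unfold pfxL
  rw [List.length_append]
  simp only [List.length_cons, List.length_nil]
  rw [List.range_succ, List.map_append]
  congr 1
  · apply List.map_congr_left
    intro k hk
    rw [List.mem_range] at hk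
    rw [List.take_append_of_le_length (by omega)]
  · simp only [List.map_cons, List.map_nil]
    congr 1
    rw [List.take_of_length_le (by simp), List.sum_append]
    simp

theorem pfxL_last (pre : List Int) :
    (PySem.List.pyGet? (pfxL pre) (-1)).getD 0 = pre.sum := by
  rw [PySem.List.pyGet?_neg_one]
  unfold pfxL
  rw [List.range_succ, List.map_append]
  simp

def buildB (nums : List Int) : List Int :=
  nums.foldl (fun s x => s ++ [(PySem.List.pyGet? s (-1)).getD 0 + x]) [(0 : Int)]

theorem buildB_eq (nums : List Int) :
    ∀ pre : List Int,
      nums.foldl (fun s x => s ++ [(PySem.List.pyGet? s (-1)).getD 0 + x]) (pfxL pre)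
        = pfxL (pre ++ nums) := by
  induction nums with
  | nil => intro pre; simp
  | cons x rest ih =>
    intro pre
    rw [List.foldl_cons, pfxL_last, ← pfxL_concat, ih (pre ++ [x])]
    simp

theorem buildB_good (nums : List Int) :
    ∀ j ≤ nums.length, (buildB nums).getD j 0 = pfSum nums j := by
  intro j hj
  unfold buildB
  rw [← pfxL_nil, buildB_eq nums [], List.nil_append]
  unfold pfxL pfSum
  rw [List.getD_eq_getElem?_getD, List.getElem?_map, List.getElem?_range (by omega)]
  rfl

-- ===== scan/search specs =====
theorem advL_spec (a : List Int) (pf : Nat → Int) (n i : Nat)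
    (hGood : ∀ j ≤ n, a.getD j 0 = pf j) (hi : i ≤ n) :
    ∀ m s, n - s ≤ m → s ≤ n →
      StopSpec n (fun j => pf j < 2 * pf i) s (advL a n i m s) := by
  intro m
  induction m with
  | zero =>
    intro s hm hs
    simp only [advL]
    exact ⟨le_rfl, hs, fun j h1 h2 => absurd h1 (by omega), fun h => by
      intro hc
      omega⟩
  | succ m ih =>
    intro s hm hs
    simp only [advL]
    by_cases h : s < n ∧ a.getD s 0 - a.getD i 0 < a.getD i 0
    · rw [if_pos h]
      obtain ⟨a1, b1, c1, d1⟩ := ih (s + 1) (by omega) (by omega)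
      refine ⟨by omega, b1, fun j h1 h2 => ?_, d1⟩
      rcases Nat.eq_or_lt_of_le h1 with h' | h'
      · have hj : j = s := h'.symm
        subst hj
        have hc := h.2
        rw [hGood j (le_of_lt h.1), hGood i hi] at hc
        omega
      · exact c1 j (by omega) h2
    · rw [if_neg h]
      refine ⟨le_rfl, hs, fun j h1 h2 => absurd h1 (by omega), fun hlt => ?_⟩
      intro hc
      apply h
      refine ⟨hlt, ?_⟩
      rw [hGood s (by omega), hGood i hi]
      omega

theorem advR_spec (a : List Int) (pf : Nat → Int) (n i : Nat)
    (hGood : ∀ j ≤ n, a.getD j 0 = pf j) (hi : i ≤ n) :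
    ∀ m s, n - s ≤ m → s ≤ n →
      StopSpec n (fun j => 2 * pf j ≤ pf n + pf i) s (advR a n i m s) := by
  intro m
  induction m with
  | zero =>
    intro s hm hs
    simp only [advR]
    exact ⟨le_rfl, hs, fun j h1 h2 => absurd h1 (by omega), fun h => by
      intro hc
      omega⟩
  | succ m ih =>
    intro s hm hs
    simp only [advR]
    by_cases h : s < n ∧ a.getD n 0 - a.getD s 0 ≥ a.getD s 0 - a.getD i 0
    · rw [if_pos h]
      obtain ⟨a1, b1, c1, d1⟩ := ih (s + 1) (by omega) (by omega)
      refine ⟨by omega, b1, fun j h1 h2 => ?_, d1⟩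
      rcases Nat.eq_or_lt_of_le h1 with h' | h'
      · have hj : j = s := h'.symm
        subst hj
        have hc := h.2
        rw [hGood n le_rfl, hGood j (le_of_lt h.1), hGood i hi] at hc
        omega
      · exact c1 j (by omega) h2
    · rw [if_neg h]
      refine ⟨le_rfl, hs, fun j h1 h2 => absurd h1 (by omega), fun hlt => ?_⟩
      intro hc
      apply h
      refine ⟨hlt, ?_⟩
      rw [hGood n le_rfl, hGood s (by omega), hGood i hi]
      omega

theorem firstGe_spec (a : List Int) (n : Nat) (t : Int)
    (mono : ∀ j k, j ≤ k → k ≤ n → a.getD j 0 ≤ a.getD k 0) :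
    ∀ m lo hi, hi - lo ≤ m → lo ≤ hi → hi ≤ n →
      lo ≤ firstGe a t m lo hi ∧ firstGe a t m lo hi ≤ hi ∧
      (∀ j, lo ≤ j → j < firstGe a t m lo hi → a.getD j 0 < t) ∧
      (firstGe a t m lo hi < hi → t ≤ a.getD (firstGe a t m lo hi) 0) := by
  intro m
  induction m with
  | zero =>
    intro lo hi hm hlo hhi
    have : lo = hi := by omega
    subst this
    simp only [firstGe]
    exact ⟨le_rfl, le_rfl, fun j h1 h2 => by omega, fun h => by omega⟩
  | succ m ih =>
    intro lo hi hm hlo hhi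
    by_cases hlh : lo < hi
    · simp only [firstGe]
      rw [if_pos hlh]
      set mid := (lo + hi) / 2 with hmid
      have hmlt : mid < hi := by omega
      have hmge : lo ≤ mid := by omega
      by_cases hc : a.getD mid 0 ≥ t
      · rw [if_pos hc]
        obtain ⟨a1, b1, c1, d1⟩ := ih lo mid (by omega) hmge (by omega)
        refine ⟨a1, by omega, c1, fun hR => ?_⟩
        rcases Nat.eq_or_lt_of_le b1 with h' | h'
        · rw [h']; exact hc
        · exact d1 h'
      · rw [if_neg hc]
        obtain ⟨a1, b1, c1, d1⟩ := ih (mid + 1) hi (by omega) (by omega) hhi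
        refine ⟨by omega, b1, fun j h1 h2 => ?_, d1⟩
        by_cases hj : j ≤ mid
        · exact lt_of_le_of_lt (mono j mid hj (by omega)) (by omega)
        · exact c1 j (by omega) h2
    · simp only [firstGe]
      rw [if_neg hlh]
      exact ⟨le_rfl, hlo, fun j h1 h2 => by omega, fun h => by omega⟩

theorem firstGt_spec (a : List Int) (n : Nat) (t : Int)
    (mono : ∀ j k, j ≤ k → k ≤ n → a.getD j 0 ≤ a.getD k 0) :
    ∀ m lo hi, hi - lo ≤ m → lo ≤ hi → hi ≤ n →
      lo ≤ firstGt a t m lo hi ∧ firstGt a t m lo hi ≤ hi ∧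
      (∀ j, lo ≤ j → j < firstGt a t m lo hi → a.getD j 0 ≤ t) ∧
      (firstGt a t m lo hi < hi → t < a.getD (firstGt a t m lo hi) 0) := by
  intro m
  induction m with
  | zero =>
    intro lo hi hm hlo hhi
    have : lo = hi := by omega
    subst this
    simp only [firstGt]
    exact ⟨le_rfl, le_rfl, fun j h1 h2 => by omega, fun h => by omega⟩
  | succ m ih =>
    intro lo hi hm hlo hhi
    by_cases hlh : lo < hi
    · simp only [firstGt]
      rw [if_pos hlh]
      set mid := (lo + hi) / 2 with hmid
      have hmlt : mid < hi := by omega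
      have hmge : lo ≤ mid := by omega
      by_cases hc : a.getD mid 0 > t
      · rw [if_pos hc]
        obtain ⟨a1, b1, c1, d1⟩ := ih lo mid (by omega) hmge (by omega)
        refine ⟨a1, by omega, c1, fun hR => ?_⟩
        rcases Nat.eq_or_lt_of_le b1 with h' | h'
        · rw [h']; exact hc
        · exact d1 h'
      · rw [if_neg hc]
        obtain ⟨a1, b1, c1, d1⟩ := ih (mid + 1) hi (by omega) (by omega) hhi
        refine ⟨by omega, b1, fun j h1 h2 => ?_, d1⟩
        by_cases hj : j ≤ mid
        · exact le_trans (mono j mid hj (by omega)) (by omega)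
        · exact c1 j (by omega) h2
    · simp only [firstGt]
      rw [if_neg hlh]
      exact ⟨le_rfl, hlo, fun j h1 h2 => by omega, fun h => by omega⟩

-- ===== the two loop bodies, named =====
def stepA (nums : List Int) (st : Nat × Nat × Int) (i : Nat) : Nat × Nat × Int :=
  let n := nums.length
  let summ := buildA nums
  let l0 := max st.1 (i + 1)
  let r0 := max st.2.1 (i + 1)
  let r := advR summ n i (n - r0) r0
  let l := advL summ n i (n - l0) l0
  (l, r, if r ≥ l then st.2.2 + ((r : Int) - (l : Int)) else st.2.2)

def stepB (nums : List Int) (ans : Int) (i : Nat) : Int :=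
  let n := nums.length
  let summ := buildB nums
  let total := summ.getD n 0
  let lo := firstGe summ (2 * summ.getD i 0) (n - (i + 1)) (i + 1) n
  let hi := firstGt summ (PySem.Int.floordiv (total + summ.getD i 0) 2) (n - (i + 1)) (i + 1) n
  if hi > lo then ans + ((hi : Int) - (lo : Int)) else ans

theorem waysToSplit_eq_fold (nums : List Int) :
    waysToSplit nums =
      PySem.Int.mod (((List.range' 1 (nums.length - 2)).foldl (stepA nums) (2, 2, 0)).2.2)
        1000000007 := rfl

theorem waysToSplit_alt_eq_fold (nums : List Int) :
    waysToSplit_alt nums =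
      PySem.Int.mod ((List.range' 1 (nums.length - 2)).foldl (stepB nums) 0)
        1000000007 := rfl

-- main loop invariant
theorem main_fold (nums : List Int) (hPre : ∀ x ∈ nums, 0 ≤ x) :
    ∀ k, k ≤ nums.length - 2 →
      (((List.range' 1 k).foldl (stepA nums) (2, 2, 0)).2.2
          = (List.range' 1 k).foldl (stepB nums) 0)
      ∧ (k = 0 → ((List.range' 1 k).foldl (stepA nums) (2, 2, 0)).1 = 2
          ∧ ((List.range' 1 k).foldl (stepA nums) (2, 2, 0)).2.1 = 2)
      ∧ (1 ≤ k →
          StopSpec nums.length (fun j => pfSum nums j < 2 * pfSum nums k) (k + 1)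
            (((List.range' 1 k).foldl (stepA nums) (2, 2, 0)).1)
          ∧ StopSpec nums.length
              (fun j => 2 * pfSum nums j ≤ pfSum nums nums.length + pfSum nums k) (k + 1)
              (((List.range' 1 k).foldl (stepA nums) (2, 2, 0)).2.1)) := by
  intro k
  induction k with
  | zero =>
    intro _
    exact ⟨rfl, fun _ => ⟨rfl, rfl⟩, fun h => absurd h (by omega)⟩
  | succ k ih =>
    intro hk
    have hn3 : 3 ≤ nums.length := by omega
    obtain ⟨ihAns, ihZero, ihPos⟩ := ih (by omega)
    rw [List.range'_concat]
    simp only [List.foldl_append, List.foldl_cons, List.foldl_nil]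
    have hidx : 1 + 1 * k = k + 1 := by omega
    rw [hidx]
    set st := (List.range' 1 k).foldl (stepA nums) (2, 2, 0) with hst
    set ansB := (List.range' 1 k).foldl (stepB nums) 0 with hansB
    set n := nums.length with hn
    -- bounds on the carried pointers
    have h1n : st.1 ≤ n := by
      by_cases hk0 : k = 0
      · rw [(ihZero hk0).1]; omega
      · exact ((ihPos (by omega)).1).2.1
    have h2n : st.2.1 ≤ n := by
      by_cases hk0 : k = 0
      · rw [(ihZero hk0).2]; omega
      · exact ((ihPos (by omega)).2).2.1
    -- continue-condition survives on the skipped prefix  [k+2, max st (k+2))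
    have hcontL : ∀ j, k + 2 ≤ j → j < max st.1 (k + 2) →
        pfSum nums j < 2 * pfSum nums (k + 1) := by
      intro j hj hjl
      by_cases hk0 : k = 0
      · rw [(ihZero hk0).1] at hjl
        omega
      · have hjst : j < st.1 := by omega
        have := ((ihPos (by omega)).1).2.2.1 j (by omega) hjst
        have hmono : pfSum nums k ≤ pfSum nums (k + 1) := pfSum_mono nums hPre (by omega)
        omega
    have hcontR : ∀ j, k + 2 ≤ j → j < max st.2.1 (k + 2) →
        2 * pfSum nums j ≤ pfSum nums n + pfSum nums (k + 1) := by
      intro j hj hjl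
      by_cases hk0 : k = 0
      · rw [(ihZero hk0).2] at hjl
        omega
      · have hjst : j < st.2.1 := by omega
        have := ((ihPos (by omega)).2).2.2.1 j (by omega) hjst
        have hmono : pfSum nums k ≤ pfSum nums (k + 1) := pfSum_mono nums hPre (by omega)
        omega
    -- A-side stop specs for iteration i = k+1
    have SL : StopSpec n (fun j => pfSum nums j < 2 * pfSum nums (k + 1)) (k + 2)
        (advL (buildA nums) n (k + 1) (n - max st.1 (k + 2)) (max st.1 (k + 2))) := by
      apply stopSpec_start
        (advL_spec (buildA nums) (pfSum nums) n (k + 1) (buildA_good nums) (by omega)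
          (n - max st.1 (k + 2)) (max st.1 (k + 2)) le_rfl (by omega))
        (le_max_right _ _) hcontL
    have SR : StopSpec n (fun j => 2 * pfSum nums j ≤ pfSum nums n + pfSum nums (k + 1)) (k + 2)
        (advR (buildA nums) n (k + 1) (n - max st.2.1 (k + 2)) (max st.2.1 (k + 2))) := by
      apply stopSpec_start
        (advR_spec (buildA nums) (pfSum nums) n (k + 1) (buildA_good nums) (by omega)
          (n - max st.2.1 (k + 2)) (max st.2.1 (k + 2)) le_rfl (by omega))
        (le_max_right _ _) hcontR
    -- B-side stop specs
    have monoB : ∀ j k', j ≤ k' → k' ≤ n → (buildB nums).getD j 0 ≤ (buildB nums).getD k' 0 := by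
      intro j k' hjk hk'
      rw [buildB_good nums j (by omega), buildB_good nums k' hk']
      exact pfSum_mono nums hPre hjk
    have TL : StopSpec n (fun j => pfSum nums j < 2 * pfSum nums (k + 1)) (k + 2)
        (firstGe (buildB nums) (2 * (buildB nums).getD (k + 1) 0) (n - (k + 2)) (k + 2) n) := by
      obtain ⟨a1, b1, c1, d1⟩ := firstGe_spec (buildB nums) n
        (2 * (buildB nums).getD (k + 1) 0) monoB (n - (k + 2)) (k + 2) n le_rfl (by omega) le_rfl
      set R := firstGe (buildB nums) (2 * (buildB nums).getD (k + 1) 0) (n - (k + 2)) (k + 2) n with hRdef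
      refine ⟨a1, b1, fun j hj hjR => ?_, fun hR => ?_⟩
      · show pfSum nums j < 2 * pfSum nums (k + 1)
        have := c1 j hj hjR
        rw [buildB_good nums j (by omega), buildB_good nums (k + 1) (by omega)] at this
        exact this
      · show ¬ (pfSum nums R < 2 * pfSum nums (k + 1))
        have := d1 hR
        rw [buildB_good nums R (le_of_lt hR), buildB_good nums (k + 1) (by omega)] at this
        omega
    have hdiv : ∀ x : Int,
        (x ≤ PySem.Int.floordiv ((buildB nums).getD n 0 + (buildB nums).getD (k + 1) 0) 2
          ↔ 2 * x ≤ pfSum nums n + pfSum nums (k + 1)) := by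
      intro x
      rw [buildB_good nums n le_rfl, buildB_good nums (k + 1) (by omega)]
      rw [PySem.Int.floordiv_eq_ediv_of_pos (by norm_num)]
      omega
    have TR : StopSpec n (fun j => 2 * pfSum nums j ≤ pfSum nums n + pfSum nums (k + 1)) (k + 2)
        (firstGt (buildB nums)
          (PySem.Int.floordiv ((buildB nums).getD n 0 + (buildB nums).getD (k + 1) 0) 2)
          (n - (k + 2)) (k + 2) n) := by
      obtain ⟨a1, b1, c1, d1⟩ := firstGt_spec (buildB nums) n
        (PySem.Int.floordiv ((buildB nums).getD n 0 + (buildB nums).getD (k + 1) 0) 2)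
        monoB (n - (k + 2)) (k + 2) n le_rfl (by omega) le_rfl
      set R := firstGt (buildB nums)
          (PySem.Int.floordiv ((buildB nums).getD n 0 + (buildB nums).getD (k + 1) 0) 2)
          (n - (k + 2)) (k + 2) n with hRdef
      refine ⟨a1, b1, fun j hj hjR => ?_, fun hR => ?_⟩
      · show 2 * pfSum nums j ≤ pfSum nums n + pfSum nums (k + 1)
        have := c1 j hj hjR
        rw [← buildB_good nums j (by omega)]
        exact (hdiv _).mp this
      · show ¬ (2 * pfSum nums R ≤ pfSum nums n + pfSum nums (k + 1))
        have := d1 hR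
        intro hcon
        rw [← buildB_good nums R (le_of_lt hR)] at hcon
        exact absurd ((hdiv _).mpr hcon) (by omega)
    -- the two iterations agree
    have hLeq : advL (buildA nums) n (k + 1) (n - max st.1 (k + 2)) (max st.1 (k + 2))
        = firstGe (buildB nums) (2 * (buildB nums).getD (k + 1) 0) (n - (k + 2)) (k + 2) n :=
      stopSpec_unique SL TL
    have hReq : advR (buildA nums) n (k + 1) (n - max st.2.1 (k + 2)) (max st.2.1 (k + 2))
        = firstGt (buildB nums)
          (PySem.Int.floordiv ((buildB nums).getD n 0 + (buildB nums).getD (k + 1) 0) 2)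
          (n - (k + 2)) (k + 2) n :=
      stopSpec_unique SR TR
    simp only [stepA, stepB]
    refine ⟨?_, fun h => absurd h (by omega), fun _ => ?_⟩
    · -- answers agree
      rw [ihAns, ← hLeq, ← hReq]
      set l := advL (buildA nums) n (k + 1) (n - max st.1 (k + 2)) (max st.1 (k + 2)) with hl
      set r := advR (buildA nums) n (k + 1) (n - max st.2.1 (k + 2)) (max st.2.1 (k + 2)) with hr
      rcases Nat.lt_trichotomy r l with hc | hc | hc
      · rw [if_neg (by omega), if_neg (by omega)]
      · rw [if_pos (by omega), if_neg (by omega)]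
        rw [hc]
        simp
      · rw [if_pos (by omega), if_pos (by omega)]
    · -- stop specs for the new state
      exact ⟨SL, SR⟩

-- ===== VERDICT (by name: the statement is the Claim_ definition above) =====
theorem waysToSplit_spec : Claim_equal_waysToSplit := by
  intro nums _hDom hPre
  unfold Spec_waysToSplit
  rcases hPre with hshort | hPre
  · rw [waysToSplit_eq_fold, waysToSplit_alt_eq_fold]
    have h0 : nums.length - 2 = 0 := by omega
    rw [h0]
    rfl
  · rw [waysToSplit_eq_fold, waysToSplit_alt_eq_fold, (main_fold nums hPre _ le_rfl).1]
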